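-- pv_equiv track=rewrite | github.com/stailor2000/Recipe-Recommendation | utils.py | map_to_main_category
-- ===== SOURCE A (Python) =====
-- def map_to_main_category(entry, mapping):
--     """
--     Maps a string of items to their main categories based on a mapping dictionary.
--     Synonyms in the string are replaced by their corresponding main categories,
--     and duplicate entries are removed while preserving order.
--
--     Parameters:
--         entry (str): A comma-separated string of items to map.
--         mapping (dict): A dictionary where keys are main categories and values are lists of synonyms.
--
--     Returns:
--         str or None: A comma-separated string of mapped main categories, or None if no matches were found.
--     """
--     reverse_mapping = {
--         synonym: main_category
--         for main_category, synonyms in mapping.items()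
--         for synonym in synonyms
--     }
--     # Split the string into a list
--     entry_list = [item.strip() for item in entry.split(",")]
--     # Replace each item in the list
--     mapped_list = [
--         reverse_mapping[item] for item in entry_list if item in reverse_mapping
--     ]
--     # Remove duplicates while preserving order
--     unique_list = list(dict.fromkeys(mapped_list))
--     # Return None if no matches
--     if not unique_list:
--         return None
--     return ", ".join(unique_list)
-- ===== SOURCE B (Python) =====
-- def map_to_main_category(entry, mapping):
--     result = []
--     for raw in entry.split(","):
--         item = raw.strip()
--         match = None
--         for main_category, synonyms in mapping.items():
--             if item in synonyms:
--                 match = main_category  # last matching category wins, like A's overwriting reverse dict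
--         if match is not None and match not in result:
--             result.append(match)
--     return ", ".join(result) if result else None
-- ===== Notes on version B (the rewrite author's own statement) =====
-- stated objective: alternative
-- what changed: B drops A's precomputed reverse synonym->category dict and its separate dict.fromkeys dedup pass: it makes one pass over the entry items, scanning mapping for the last category containing each item and deduplicating inline into a result list.
import Mathlib
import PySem

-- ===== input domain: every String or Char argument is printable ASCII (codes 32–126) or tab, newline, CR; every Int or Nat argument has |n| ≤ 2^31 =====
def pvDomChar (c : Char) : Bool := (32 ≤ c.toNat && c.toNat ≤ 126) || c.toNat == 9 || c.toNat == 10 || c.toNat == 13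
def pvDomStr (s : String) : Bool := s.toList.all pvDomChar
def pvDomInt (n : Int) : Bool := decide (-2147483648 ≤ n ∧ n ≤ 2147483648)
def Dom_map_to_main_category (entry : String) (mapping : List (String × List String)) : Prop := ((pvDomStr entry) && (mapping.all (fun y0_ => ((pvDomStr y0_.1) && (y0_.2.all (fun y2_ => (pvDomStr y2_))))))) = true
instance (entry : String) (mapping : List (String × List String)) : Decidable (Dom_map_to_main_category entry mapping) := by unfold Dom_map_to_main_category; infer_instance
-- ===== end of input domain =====

-- B replaces A's reverse-dict precomputation + separate dedup pass by a single pass over the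
-- entry items with a last-match scan of mapping and inline dedup (objective: alternative).

-- ===== PORT A =====
def map_to_main_category (entry : String) (mapping : List (String × List String)) : Option String :=
  let reverseMapping : PySem.Dict String String :=
    mapping.foldl (fun d p => p.2.foldl (fun d syn => d.insert syn p.1) d) PySem.Dict.empty
  let entryList : List String :=
    ((PySem.Str.split? entry ",").getD []).map (fun item => PySem.Str.strip item)
  let mappedList : List String := entryList.filterMap (fun item => reverseMapping.get? item)
  let uniqueList : List String := PySem.List.dedup mappedList
  if uniqueList = [] then none else some (PySem.Str.join ", " uniqueList)

-- ===== PORT B =====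
def pvLastMatch (mapping : List (String × List String)) (item : String) : Option String :=
  mapping.foldl (fun acc p => if p.2.contains item then some p.1 else acc) none

def map_to_main_category_alt (entry : String) (mapping : List (String × List String)) : Option String :=
  let result : List String :=
    ((PySem.Str.split? entry ",").getD []).foldl (fun res raw =>
      match pvLastMatch mapping (PySem.Str.strip raw) with
      | some c => if res.contains c then res else res ++ [c]
      | none => res) []
  if result = [] then none else some (PySem.Str.join ", " result)

-- ===== PRECONDITION & SPEC =====
def Spec_map_to_main_category (entry : String) (mapping : List (String × List String)) (out : Option String) : Prop := out = map_to_main_category_alt entry mapping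
instance (entry : String) (mapping : List (String × List String)) (out : Option String) : Decidable (Spec_map_to_main_category entry mapping out) := by unfold Spec_map_to_main_category; infer_instance

-- ===== CLAIM (what is proved, stated in full; the proofs are below) =====
def Claim_equal_map_to_main_category : Prop := ∀ (entry : String) (mapping : List (String × List String)), Dom_map_to_main_category entry mapping → Spec_map_to_main_category entry mapping (map_to_main_category entry mapping)

-- ===== LEMMAS AND PROOFS =====

-- lookup after inserting one synonym list: last write wins within the list, else the old dict
theorem pv_get_insert_syns (syns : List String) (c : String)
    (d : PySem.Dict String String) (item : String) :
    (syns.foldl (fun d syn => d.insert syn c) d).get? item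
      = if syns.contains item then some c else d.get? item := by
  induction syns generalizing d with
  | nil => simp
  | cons s t ih =>
    by_cases hs : item = s
    · subst hs
      rw [List.foldl_cons, ih]
      by_cases ht : t.contains item
      · simp only [ht, if_pos]
        simp
      · simp only [ht, if_neg Bool.false_ne_true, PySem.Dict.get?_insert_self]
        simp
    · rw [List.foldl_cons, ih, PySem.Dict.get?_insert_of_ne d c hs]
      simp [hs]

-- A's reverse dict answers exactly B's last-match scan of mapping
theorem pv_get_build_eq_lastMatch (mapping : List (String × List String)) (item : String) :
    (mapping.foldl (fun d p => p.2.foldl (fun d syn => d.insert syn p.1) d)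
        (PySem.Dict.empty : PySem.Dict String String)).get? item
      = pvLastMatch mapping item := by
  unfold pvLastMatch
  have h : ∀ (ms : List (String × List String)) (d : PySem.Dict String String),
      (ms.foldl (fun d p => p.2.foldl (fun d syn => d.insert syn p.1) d) d).get? item
        = ms.foldl (fun acc p => if p.2.contains item then some p.1 else acc) (d.get? item) := by
    intro ms
    induction ms with
    | nil => intro d; rfl
    | cons p t ih =>
      intro d
      simp only [List.foldl_cons, ih, pv_get_insert_syns]
  have : (PySem.Dict.empty : PySem.Dict String String).get? item = none := rfl
  rw [h, this]

-- dedup of the filtered map = one inline-dedup fold over the raw items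
theorem pv_dedup_fold (f : String → Option String) (L : List String) :
    PySem.List.dedup (L.filterMap f)
      = L.foldl (fun res raw =>
          match f raw with
          | some c => if res.contains c then res else res ++ [c]
          | none => res) [] := by
  rw [PySem.List.dedup_eq_ofList]
  show (L.filterMap f).foldl PySem.Set.add PySem.Set.empty = _
  rw [List.foldl_filterMap]
  simp only [PySem.Set.add, PySem.Set.contains, PySem.Set.empty]
  congr 1
  funext x y
  rcases hf : f y with _ | b <;> simp

-- ===== VERDICT (by name: the statement is the Claim_ definition above) =====
theorem map_to_main_category_spec : Claim_equal_map_to_main_category := by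
  intro entry mapping _
  unfold Spec_map_to_main_category map_to_main_category map_to_main_category_alt
  have h : PySem.List.dedup
      ((((PySem.Str.split? entry ",").getD []).map (fun item => PySem.Str.strip item)).filterMap
        (fun item =>
          (mapping.foldl (fun d p => p.2.foldl (fun d syn => d.insert syn p.1) d)
            (PySem.Dict.empty : PySem.Dict String String)).get? item))
      = ((PySem.Str.split? entry ",").getD []).foldl (fun res raw =>
          match pvLastMatch mapping (PySem.Str.strip raw) with
          | some c => if res.contains c then res else res ++ [c]
          | none => res) [] := by
    rw [pv_dedup_fold, List.foldl_map]
    simp only [pv_get_build_eq_lastMatch]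
  simp only [h]
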